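-- pv_equiv track=rewrite | github.com/masterivanic/Dev-and-it-ressource | Python/Algorithm_thinking/fizz_buzz.py | find_secret_message
-- ===== SOURCE A (Python) =====
-- def get_all_index_of_word(word:str, list_word:list[str]):
--     ids, count = [], 0
--     for idx, w in enumerate(list_word):
--         if count <= 2:
--             if word.__eq__(w):
--                 count = count + 1
--                 ids.append(idx)
--     return {word:ids}
--
-- def find_secret_message(paragraph):
--     """ Secret Message: https://www.codewars.com/kata/54808e45ab03a2c8330009fb/train/python"""
--     import string
--     punct_to_remove = string.punctuation.replace('-', '')
--     paragraph:str = paragraph.translate(str.maketrans('', '', punct_to_remove)).lower()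
--     copy = paragraph.split().copy()
--     result = list(map(lambda x: get_all_index_of_word(x, copy), copy))
--     result = {key:value[1] for d in result for key, value in d.items() if len(value) >= 2}
--     result = dict(sorted(result.items(), key=lambda item: item[1]))
--     return " ".join(result.keys())
-- ===== SOURCE B (Python) =====
-- import string
--
-- def find_secret_message(paragraph):
--     """Words occurring at least twice, emitted at their second occurrence — one pass, no sort."""
--     punct_to_remove = string.punctuation.replace('-', '')
--     words = paragraph.translate(str.maketrans('', '', punct_to_remove)).lower().split()
--     counts = {}
--     out = []
--     for w in words:
--         c = counts.get(w, 0) + 1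
--         counts[w] = c
--         if c == 2:
--             out.append(w)
--     return " ".join(out)
-- ===== Notes on version B (the rewrite author's own statement) =====
-- stated objective: alternative
-- what changed: A maps every word to a fresh whole-list index scan and then sorts the surviving (word, second-index) pairs by that index; B makes one pass with a word->count dictionary and appends each word to the output exactly when its count reaches 2, so the inner scans and the final sort disappear.
import Mathlib
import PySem

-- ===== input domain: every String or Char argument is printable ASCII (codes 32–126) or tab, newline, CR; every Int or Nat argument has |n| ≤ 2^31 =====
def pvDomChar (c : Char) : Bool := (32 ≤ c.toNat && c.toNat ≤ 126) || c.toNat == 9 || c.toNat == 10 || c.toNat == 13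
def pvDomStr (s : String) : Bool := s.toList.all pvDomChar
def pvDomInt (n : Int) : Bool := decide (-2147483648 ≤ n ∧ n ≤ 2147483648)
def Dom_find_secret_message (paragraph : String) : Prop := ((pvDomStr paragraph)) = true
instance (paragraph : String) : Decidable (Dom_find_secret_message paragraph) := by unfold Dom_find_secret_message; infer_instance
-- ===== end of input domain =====

-- B replaces A's per-word index scans and final sort by one counting pass that emits each
-- word at its second occurrence (objective: alternative).

-- string.punctuation with '-' removed (both Pythons compute this same constant)
def pvPunct : List Char := "!\"#$%&'()*+,./:;<=>?@[\\]^_`{|}~".toList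

-- ===== PORT A =====
def get_all_index_of_word (word : String) (list_word : List String) : PySem.Dict String (List Int) :=
  let st := (PySem.List.enumerate list_word 0).foldl
    (fun (st : List Int × Int) idxw =>
      if st.2 ≤ 2 then
        (if word == idxw.2 then (st.1 ++ [idxw.1], st.2 + 1) else st)
      else st)
    ([], 0)
  PySem.Dict.empty.insert word st.1

def find_secret_message (paragraph : String) : String :=
  let cleaned := String.ofList (PySem.Chars.lower (paragraph.toList.filter (fun c => !(pvPunct.contains c))))
  let copy := PySem.Str.split₀ cleaned
  let result := copy.map (fun x => get_all_index_of_word x copy)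
  let result2 := result.foldl
    (fun (acc : PySem.Dict String Int) d =>
      d.items.foldl
        (fun (acc : PySem.Dict String Int) kv =>
          if 2 ≤ kv.2.length then acc.insert kv.1 (PySem.List.pyGetD kv.2 1 0) else acc)
        acc)
    PySem.Dict.empty
  let result3 := PySem.Dict.ofList (PySem.List.sorted result2.items (fun kv => kv.2) false)
  PySem.Str.join " " result3.keys

-- ===== PORT B =====
def find_secret_message_alt (paragraph : String) : String :=
  let cleaned := String.ofList (PySem.Chars.lower (paragraph.toList.filter (fun c => !(pvPunct.contains c))))
  let words := PySem.Str.split₀ cleaned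
  let st := words.foldl
    (fun (st : PySem.Dict String Int × List String) w =>
      let c := st.1.getD w 0 + 1
      (st.1.insert w c, if c == 2 then st.2 ++ [w] else st.2))
    (PySem.Dict.empty, [])
  PySem.Str.join " " st.2

-- ===== PRECONDITION & SPEC =====
def Spec_find_secret_message (paragraph : String) (out : String) : Prop := out = find_secret_message_alt paragraph
instance (paragraph : String) (out : String) : Decidable (Spec_find_secret_message paragraph out) := by unfold Spec_find_secret_message; infer_instance

-- ===== CLAIM (what is proved, stated in full; the proofs are below) =====
def Claim_equal_find_secret_message : Prop := ∀ (paragraph : String), Dom_find_secret_message paragraph → Spec_find_secret_message paragraph (find_secret_message paragraph)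

-- ===== LEMMAS AND PROOFS =====

-- occurrence indices of w in ws, counting positions from s
def pvOccFrom (s : Int) (w : String) (ws : List String) : List Int :=
  ((PySem.List.enumerate ws s).filter (fun p => w == p.2)).map (·.1)

-- the (word, index) pairs at second occurrences, in index order; pre = already-seen prefix
def pvSecondAux : List String → List String → List (String × Int)
  | _, [] => []
  | pre, w :: t =>
      if pre.count w = 1 then (w, (pre.length : Int)) :: pvSecondAux (pre ++ [w]) t
      else pvSecondAux (pre ++ [w]) t

lemma pvOccFrom_nil (s : Int) (w : String) : pvOccFrom s w [] = [] := rfl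

lemma pvOccFrom_cons (s : Int) (w x : String) (t : List String) :
    pvOccFrom s w (x :: t) =
      (if w == x then [s] else []) ++ pvOccFrom (s + 1) w t := by
  by_cases h : w = x <;>
    simp [pvOccFrom, PySem.List.enumerate_cons, h]

lemma pvOccFrom_append (s : Int) (w : String) (l₁ l₂ : List String) :
    pvOccFrom s w (l₁ ++ l₂) = pvOccFrom s w l₁ ++ pvOccFrom (s + l₁.length) w l₂ := by
  induction l₁ generalizing s with
  | nil => simp [pvOccFrom_nil]
  | cons a t ih =>
      simp only [List.cons_append, pvOccFrom_cons, ih (s + 1), List.length_cons]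
      rw [List.append_assoc]
      congr 3
      push_cast
      ring

lemma length_pvOccFrom (s : Int) (w : String) (ws : List String) :
    (pvOccFrom s w ws).length = ws.count w := by
  induction ws generalizing s with
  | nil => simp [pvOccFrom_nil]
  | cons a t ih =>
      rw [pvOccFrom_cons, List.length_append, ih (s + 1), List.count_cons]
      by_cases h : w = a
      · subst h; simp [Nat.add_comm]
      · have h1 : (w == a) = false := by simpa using h
        have h2 : (a == w) = false := by simpa using (Ne.symm h)
        simp [h1, h2]

-- A's helper computes the first ≤3 occurrence indices
lemma A_fold_gen (w : String) (E : List (Int × String)) :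
    ∀ (ids : List Int), ids.length ≤ 3 →
      (E.foldl
        (fun (st : List Int × Int) idxw =>
          if st.2 ≤ 2 then
            (if w == idxw.2 then (st.1 ++ [idxw.1], st.2 + 1) else st)
          else st)
        (ids, (ids.length : Int))).1 =
        ids ++ ((E.filter (fun p => w == p.2)).map (·.1)).take (3 - ids.length) := by
  induction E with
  | nil => intro ids _; simp
  | cons p E ih =>
      intro ids h3
      rw [List.foldl_cons]
      by_cases hle : (ids.length : Int) ≤ 2
      · have hle' : ids.length ≤ 2 := by exact_mod_cast hle
        rw [if_pos hle]
        by_cases hw : (w == p.2) = true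
        · rw [if_pos hw]
          have hstep : ((ids, (ids.length : Int)).1 ++ [p.1], (ids, (ids.length : Int)).2 + 1)
              = (ids ++ [p.1], (((ids ++ [p.1]).length : Nat) : Int)) := by simp
          rw [hstep, ih (ids ++ [p.1]) (by simp; omega)]
          simp only [List.filter_cons, hw, if_true, List.map_cons, List.length_append,
            List.length_cons, List.length_nil, List.append_assoc]
          congr 1
          rw [show 3 - ids.length = (3 - (ids.length + 1)) + 1 from by omega,
              List.take_succ_cons]
          simp
        · have hw' : (w == p.2) = false := by simpa using hw
          rw [if_neg (by simp [hw'])]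
          simp only [List.filter_cons, hw', Bool.false_eq_true, if_false]
          exact ih ids h3
      · rw [if_neg hle]
        have h0 : 3 - ids.length = 0 := by omega
        rw [ih ids h3, h0]
        simp

lemma get_all_index_of_word_eq (w : String) (ws : List String) :
    get_all_index_of_word w ws = PySem.Dict.empty.insert w ((pvOccFrom 0 w ws).take 3) := by
  unfold get_all_index_of_word
  have h := A_fold_gen w (PySem.List.enumerate ws 0) [] (by simp)
  simp only [List.length_nil, Nat.cast_zero, List.nil_append, Nat.sub_zero] at h
  show PySem.Dict.empty.insert w
      ((PySem.List.enumerate ws 0).foldl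
        (fun (st : List Int × Int) idxw =>
          if st.2 ≤ 2 then (if w == idxw.2 then (st.1 ++ [idxw.1], st.2 + 1) else st) else st)
        ([], 0)).1 = _
  rw [h]
  rfl

-- value A extracts for word w (its second occurrence index)
def pvV (ws : List String) (w : String) : Int := PySem.List.pyGetD (pvOccFrom 0 w ws) 1 0

lemma pvV_eq (pre t : List String) (w : String) (h : pre.count w = 1) :
    pvV (pre ++ w :: t) w = (pre.length : Int) := by
  unfold pvV
  rw [pvOccFrom_append, pvOccFrom_cons]
  obtain ⟨a, ha⟩ : ∃ a, pvOccFrom 0 w pre = [a] := by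
    have hl : (pvOccFrom 0 w pre).length = 1 := by rw [length_pvOccFrom, h]
    exact List.length_eq_one_iff.mp hl
  rw [ha]
  simp only [beq_self_eq_true, if_true, zero_add]
  rw [show (1 : Int) = ((1 : Nat) : Int) from rfl, PySem.List.pyGetD_natCast]
  simp [List.getD]

lemma count_append_singleton (pre : List String) (w x : String) :
    (pre ++ [w]).count x = pre.count x + (if w = x then 1 else 0) := by
  by_cases h : w = x <;> simp [List.count_append, h]

lemma mem_pvSecondAux (rest : List String) :
    ∀ (pre : List String) (p : String × Int),
      p ∈ pvSecondAux pre rest ↔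
        pre.count p.1 ≤ 1 ∧ 2 ≤ (pre ++ rest).count p.1 ∧ p.2 = pvV (pre ++ rest) p.1 := by
  induction rest with
  | nil =>
      intro pre p
      simp only [pvSecondAux, List.not_mem_nil, false_iff, List.append_nil]
      intro hc
      omega
  | cons w t ih =>
      intro pre p
      have hfull : (pre ++ [w]) ++ t = pre ++ w :: t := by simp
      by_cases h : pre.count w = 1
      · rw [show pvSecondAux pre (w :: t) = (w, (pre.length : Int)) :: pvSecondAux (pre ++ [w]) t
            from by rw [pvSecondAux, if_pos h]]
        rw [List.mem_cons, ih (pre ++ [w]) p, hfull]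
        constructor
        · rintro (rfl | ⟨h1, h2, h3⟩)
          · refine ⟨by simpa using h.le, ?_, ?_⟩
            · simp only [List.count_append, List.count_cons, beq_self_eq_true, if_true, h]
              omega
            · exact (pvV_eq pre t w h).symm
          · refine ⟨?_, h2, h3⟩
            have := count_append_singleton pre w p.1
            rcases eq_or_ne w p.1 with he | he
            · rw [if_pos he] at this; omega
            · rw [if_neg he] at this; omega
        · rintro ⟨h1, h2, h3⟩
          by_cases hw : p.1 = w
          · left
            have hv : p.2 = (pre.length : Int) := by
              rw [h3, hw, pvV_eq pre t w h]
            exact Prod.ext hw hv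
          · right
            refine ⟨?_, h2, h3⟩
            have hcs := count_append_singleton pre w p.1
            have hne : ¬ (w = p.1) := fun e => hw e.symm
            rw [if_neg hne] at hcs
            omega
      · rw [show pvSecondAux pre (w :: t) = pvSecondAux (pre ++ [w]) t
            from by rw [pvSecondAux, if_neg h]]
        rw [ih (pre ++ [w]) p, hfull]
        have hcnt := count_append_singleton pre w p.1
        by_cases hw : w = p.1
        · subst hw
          rw [if_pos rfl] at hcnt
          constructor
          · rintro ⟨h1, h2, h3⟩
            exact ⟨by omega, h2, h3⟩
          · rintro ⟨h1, h2, h3⟩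
            exact ⟨by omega, h2, h3⟩
        · rw [if_neg hw] at hcnt
          rw [hcnt]
          simp

lemma le_snd_pvSecondAux (rest : List String) :
    ∀ (pre : List String) (p : String × Int), p ∈ pvSecondAux pre rest → (pre.length : Int) ≤ p.2 := by
  induction rest with
  | nil => intro pre p hp; simp [pvSecondAux] at hp
  | cons w t ih =>
      intro pre p hp
      by_cases h : pre.count w = 1
      · rw [show pvSecondAux pre (w :: t) = (w, (pre.length : Int)) :: pvSecondAux (pre ++ [w]) t
            from by rw [pvSecondAux, if_pos h]] at hp
        rcases List.mem_cons.mp hp with rfl | hp'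
        · simp
        · have := ih (pre ++ [w]) p hp'
          simp only [List.length_append, List.length_cons, List.length_nil] at this
          push_cast at this ⊢
          omega
      · rw [show pvSecondAux pre (w :: t) = pvSecondAux (pre ++ [w]) t
            from by rw [pvSecondAux, if_neg h]] at hp
        have := ih (pre ++ [w]) p hp
        simp only [List.length_append, List.length_cons, List.length_nil] at this
        push_cast at this ⊢
        omega

lemma snd_lt_pvSecondAux (rest : List String) :
    ∀ (pre : List String), (pvSecondAux pre rest).Pairwise (fun a b => a.2 < b.2) := by
  induction rest with
  | nil => intro pre; simp [pvSecondAux]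
  | cons w t ih =>
      intro pre
      by_cases h : pre.count w = 1
      · rw [show pvSecondAux pre (w :: t) = (w, (pre.length : Int)) :: pvSecondAux (pre ++ [w]) t
            from by rw [pvSecondAux, if_pos h]]
        refine List.Pairwise.cons ?_ (ih (pre ++ [w]))
        intro q hq
        have := le_snd_pvSecondAux t (pre ++ [w]) q hq
        simp only [List.length_append, List.length_cons, List.length_nil] at this
        push_cast at this ⊢
        omega
      · rw [show pvSecondAux pre (w :: t) = pvSecondAux (pre ++ [w]) t
            from by rw [pvSecondAux, if_neg h]]
        exact ih (pre ++ [w])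

lemma nodup_fst_pvSecondAux (rest : List String) :
    ∀ (pre : List String), ((pvSecondAux pre rest).map (·.1)).Nodup := by
  induction rest with
  | nil => intro pre; simp [pvSecondAux]
  | cons w t ih =>
      intro pre
      by_cases h : pre.count w = 1
      · rw [show pvSecondAux pre (w :: t) = (w, (pre.length : Int)) :: pvSecondAux (pre ++ [w]) t
            from by rw [pvSecondAux, if_pos h]]
        rw [List.map_cons, List.nodup_cons]
        refine ⟨?_, ih (pre ++ [w])⟩
        intro hmem
        obtain ⟨q, hq, hq1⟩ := List.mem_map.mp hmem
        have hm1 := ((mem_pvSecondAux t (pre ++ [w]) q).mp hq).1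
        rw [hq1] at hm1
        simp [List.count_append] at hm1
        omega
      · rw [show pvSecondAux pre (w :: t) = pvSecondAux (pre ++ [w]) t
            from by rw [pvSecondAux, if_neg h]]
        exact ih (pre ++ [w])

-- B's loop emits exactly the first components of pvSecondAux
lemma B_fold (rest : List String) :
    ∀ (pre : List String) (d : PySem.Dict String Int) (acc : List String),
      (∀ x, d.getD x 0 = (pre.count x : Int)) →
      (rest.foldl
        (fun (st : PySem.Dict String Int × List String) w =>
          let c := st.1.getD w 0 + 1
          (st.1.insert w c, if c == 2 then st.2 ++ [w] else st.2))
        (d, acc)).2 = acc ++ (pvSecondAux pre rest).map (·.1) := by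
  induction rest with
  | nil =>
      intro pre d acc _
      rw [List.foldl_nil, show pvSecondAux pre [] = [] from rfl]
      simp
  | cons w t ih =>
      intro pre d acc hd
      rw [List.foldl_cons]
      have hgetD : ∀ x, (d.insert w (d.getD w 0 + 1)).getD x 0 = (((pre ++ [w]).count x : Nat) : Int) := by
        intro x
        rw [PySem.Dict.getD_insert]
        by_cases hx : x = w
        · rw [if_pos hx, hd w, hx, count_append_singleton]
          simp
        · rw [if_neg hx, hd x, count_append_singleton]
          have : ¬ (w = x) := fun e => hx e.symm
          simp [this]
      by_cases h : pre.count w = 1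
      · rw [show pvSecondAux pre (w :: t) = (w, (pre.length : Int)) :: pvSecondAux (pre ++ [w]) t
            from by rw [pvSecondAux, if_pos h]]
        have hc : (d.getD w 0 + 1 == (2 : Int)) = true := by
          rw [hd w, h]
          decide
        simp only [hc, if_true]
        rw [ih (pre ++ [w]) _ _ hgetD]
        simp
      · rw [show pvSecondAux pre (w :: t) = pvSecondAux (pre ++ [w]) t
            from by rw [pvSecondAux, if_neg h]]
        have hc : (d.getD w 0 + 1 == (2 : Int)) = false := by
          rw [hd w]
          simp only [beq_eq_false_iff_ne]
          intro he
          apply h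
          omega
        simp only [hc, Bool.false_eq_true, if_false]
        exact ih (pre ++ [w]) _ _ hgetD

-- A's dict loop, getD of an insert-only fold with key-determined values
lemma getD_vfold (v : String → Int) (l : List String) :
    ∀ (d : PySem.Dict String Int) (x : String) (d0 : Int),
      (l.foldl (fun d k => d.insert k (v k)) d).getD x d0 =
        if x ∈ l then v x else d.getD x d0 := by
  induction l with
  | nil => intro d x d0; simp
  | cons a t ih =>
      intro d x d0
      rw [List.foldl_cons, ih]
      by_cases hx : x = a
      · subst hx
        by_cases hm : x ∈ t <;> simp [hm]
      · rw [PySem.Dict.getD_insert, if_neg hx]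
        by_cases hm : x ∈ t <;> simp [hm, hx]

lemma items_vfold (v : String → Int) (l : List String) :
    (l.foldl (fun d k => d.insert k (v k)) PySem.Dict.empty).items =
      (PySem.Set.ofList l).map (fun k => (k, v k)) := by
  have hnd : (l.foldl (fun d k => d.insert k (v k)) PySem.Dict.empty).keys.Nodup :=
    PySem.Dict.nodup_keys_foldl_insert l (fun _ k => v k) PySem.Dict.empty
      (by simp)
  have hkeys : (l.foldl (fun d k => d.insert k (v k)) PySem.Dict.empty).keys =
      PySem.Set.ofList l := by
    have := PySem.Dict.keys_foldl_insert l (fun _ k => v k) PySem.Dict.empty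
    simpa [PySem.Dict.keys_empty] using this
  rw [PySem.Dict.items_eq_map_keys _ hnd 0, hkeys]
  apply List.map_congr_left
  intro k hk
  have hkl : k ∈ l := (PySem.Set.mem_ofList l k).mp hk
  rw [getD_vfold, if_pos hkl]

lemma pyGetD1_take3 (l : List Int) :
    PySem.List.pyGetD (l.take 3) 1 0 = PySem.List.pyGetD l 1 0 := by
  match l with
  | [] => rfl
  | [a] => rfl
  | a :: b :: t =>
      rw [show (a :: b :: t).take 3 = a :: b :: t.take 1 from rfl,
          show (1 : Int) = ((1 : Nat) : Int) from rfl,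
          PySem.List.pyGetD_natCast, PySem.List.pyGetD_natCast]
      rfl

lemma items_insert_empty (x : String) (ids : List Int) :
    (PySem.Dict.empty.insert x ids).items = [(x, ids)] := by
  rw [PySem.Dict.items_insert]
  simp [PySem.Dict.contains_empty]
  rfl

lemma A_dict_eq (ws : List String) :
    ((ws.map (fun x => get_all_index_of_word x ws)).foldl
      (fun (acc : PySem.Dict String Int) d =>
        d.items.foldl
          (fun (acc : PySem.Dict String Int) kv =>
            if 2 ≤ kv.2.length then acc.insert kv.1 (PySem.List.pyGetD kv.2 1 0) else acc)
          acc)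
      PySem.Dict.empty)
    = (ws.filter (fun x => decide (2 ≤ ws.count x))).foldl
        (fun d k => d.insert k (pvV ws k)) PySem.Dict.empty := by
  rw [List.foldl_map, List.foldl_filter]
  have hstep : (fun (acc : PySem.Dict String Int) (x : String) =>
      (get_all_index_of_word x ws).items.foldl
        (fun (acc : PySem.Dict String Int) kv =>
          if 2 ≤ kv.2.length then acc.insert kv.1 (PySem.List.pyGetD kv.2 1 0) else acc)
        acc)
      = (fun (acc : PySem.Dict String Int) (x : String) =>
          if decide (2 ≤ ws.count x) = true then acc.insert x (pvV ws x) else acc) := by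
    funext acc x
    rw [get_all_index_of_word_eq, items_insert_empty, List.foldl_cons, List.foldl_nil]
    have hlen : (2 ≤ ((pvOccFrom 0 x ws).take 3).length) ↔ (2 ≤ ws.count x) := by
      rw [List.length_take, length_pvOccFrom]
      omega
    simp only [decide_eq_true_eq]
    rw [pyGetD1_take3]
    exact if_congr hlen rfl rfl
  rw [hstep]

lemma sorted_items_eq (ws : List String) :
    PySem.List.sorted ((PySem.Set.ofList (ws.filter (fun x => decide (2 ≤ ws.count x)))).map
        (fun k => (k, pvV ws k))) (fun kv => kv.2) false
      = pvSecondAux [] ws := by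
  apply PySem.List.sorted_eq_of_perm_of_pairwise_lt
  · apply List.perm_of_nodup_nodup_toFinset_eq
    · exact (nodup_fst_pvSecondAux ws []).of_map
    · refine List.Nodup.map ?_ (PySem.Set.nodup_ofList _)
      intro a b hab
      exact congrArg Prod.fst hab
    · ext p
      simp only [List.mem_toFinset]
      rw [mem_pvSecondAux ws [] p]
      simp only [List.nil_append, List.count_nil]
      constructor
      · rintro ⟨-, h2, h3⟩
        refine List.mem_map.mpr ⟨p.1, ?_, ?_⟩
        · refine (PySem.Set.mem_ofList _ _).mpr ?_
          refine List.mem_filter.mpr ⟨?_, by simpa using h2⟩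
          exact List.count_pos_iff.mp (by omega)
        · rw [← h3]
      · intro hp
        obtain ⟨k, hk, hkp⟩ := List.mem_map.mp hp
        have hkf := (PySem.Set.mem_ofList _ _).mp hk
        have h2 : 2 ≤ ws.count k := by simpa using (List.mem_filter.mp hkf).2
        subst hkp
        exact ⟨by simp, by simpa using h2, by simp⟩
  · exact snd_lt_pvSecondAux ws []

lemma set_update_of_nodup (l : List String) :
    ∀ (s : List String), l.Nodup → (∀ x ∈ l, x ∉ s) → PySem.Set.update s l = s ++ l := by
  induction l with
  | nil => intro s _ _; simp [PySem.Set.update]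
  | cons a t ih =>
      intro s hnd hdisj
      have hna : a ∉ s := hdisj a (List.mem_cons_self)
      have hadd : PySem.Set.add s a = s ++ [a] := by
        simp only [PySem.Set.add]
        rw [if_neg (by simpa [PySem.Set.contains] using hna)]
      have step : PySem.Set.update s (a :: t) = PySem.Set.update (s ++ [a]) t := by
        simp only [PySem.Set.update, List.foldl_cons, hadd]
      rw [step, ih (s ++ [a]) hnd.of_cons]
      · simp
      · intro x hx
        simp only [List.mem_append, List.mem_singleton]
        rintro (hxs | rfl)
        · exact hdisj x (List.mem_cons_of_mem _ hx) hxs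
        · exact (List.nodup_cons.mp hnd).1 hx

lemma keys_ofList_nodup (ps : List (String × Int)) (h : (ps.map (·.1)).Nodup) :
    (PySem.Dict.ofList ps).keys = ps.map (·.1) := by
  have hk := PySem.Dict.keys_foldl_insert_key ps (fun p : String × Int => p.1) (fun _ p => p.2)
    PySem.Dict.empty
  have hof : PySem.Dict.ofList ps
      = List.foldl (fun (d : PySem.Dict String Int) (x : String × Int) => d.insert x.1 x.2)
          PySem.Dict.empty ps := rfl
  have hk2 : (PySem.Dict.ofList ps).keys = PySem.Set.update [] (ps.map (fun p => p.1)) := by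
    rw [hof]
    simpa using hk
  rw [hk2, set_update_of_nodup (ps.map (fun p => p.1)) [] (by simpa using h) (by simp),
      List.nil_append]

-- the common core: everything after the shared clean/lower/split preprocessing agrees
lemma core_eq (ws : List String) :
    (PySem.Str.join " "
      (PySem.Dict.ofList
        (PySem.List.sorted
          ((ws.map (fun x => get_all_index_of_word x ws)).foldl
            (fun (acc : PySem.Dict String Int) d =>
              d.items.foldl
                (fun (acc : PySem.Dict String Int) kv =>
                  if 2 ≤ kv.2.length then acc.insert kv.1 (PySem.List.pyGetD kv.2 1 0) else acc)
                acc)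
            PySem.Dict.empty).items
          (fun kv => kv.2) false)).keys) =
    PySem.Str.join " "
      (ws.foldl
        (fun (st : PySem.Dict String Int × List String) w =>
          let c := st.1.getD w 0 + 1
          (st.1.insert w c, if c == 2 then st.2 ++ [w] else st.2))
        (PySem.Dict.empty, [])).2 := by
  have h1 := A_dict_eq ws
  rw [h1, items_vfold (pvV ws) (ws.filter (fun x => decide (2 ≤ ws.count x))),
      sorted_items_eq ws,
      keys_ofList_nodup _ (nodup_fst_pvSecondAux ws []),
      B_fold ws [] PySem.Dict.empty []
        (by intro x; simp)]
  rw [List.nil_append]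

-- ===== VERDICT (by name: the statement is the Claim_ definition above) =====
theorem find_secret_message_spec : Claim_equal_find_secret_message := by
  intro paragraph _
  unfold Spec_find_secret_message find_secret_message find_secret_message_alt
  exact core_eq _
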